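-- pv_equiv track=rewrite | github.com/wangforgo/marl | qmix/cg_env.py | move_one_step
-- ===== SOURCE A (Python) =====
-- import copy
--
-- W = 21
--
-- def move_one_step(actions):
--     prev = actions[0]
--     target = copy.deepcopy(actions[1])
--     while True:
--         tgt_mp = {}
--         has_conflict = False
--         for i in range(len(target)):
--             p_int = target[i][0] * W + target[i][1]
--             if tgt_mp.get(p_int) is None:
--                 tgt_mp[p_int] = [i]
--             else:
--                 tgt_mp[p_int].append(i)
--                 has_conflict = True
--                 return None
--         if not has_conflict:
--             break
--         for k in tgt_mp:
--             v = tgt_mp[k]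
--             if len(v) > 1:
--                 for i in v:
--                     target[i] = prev[i]
--
--     return target
-- ===== SOURCE B (Python) =====
-- import copy
--
-- W = 21
--
-- def move_one_step(actions):
--     cells = actions[1]
--     keys = [c[0] * W + c[1] for c in cells]
--     ordered = sorted(keys)
--     for x, y in zip(ordered, ordered[1:]):
--         if x == y:
--             return None
--     return copy.deepcopy(cells)
-- ===== Notes on version B (the rewrite author's own statement) =====
-- stated objective: alternative
-- what changed: Replaces A's while-loop with a hash map of index lists and early return by a single comprehension of flattened keys, a sort, and an adjacent-pair scan over the sorted keys.
import Mathlib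
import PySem

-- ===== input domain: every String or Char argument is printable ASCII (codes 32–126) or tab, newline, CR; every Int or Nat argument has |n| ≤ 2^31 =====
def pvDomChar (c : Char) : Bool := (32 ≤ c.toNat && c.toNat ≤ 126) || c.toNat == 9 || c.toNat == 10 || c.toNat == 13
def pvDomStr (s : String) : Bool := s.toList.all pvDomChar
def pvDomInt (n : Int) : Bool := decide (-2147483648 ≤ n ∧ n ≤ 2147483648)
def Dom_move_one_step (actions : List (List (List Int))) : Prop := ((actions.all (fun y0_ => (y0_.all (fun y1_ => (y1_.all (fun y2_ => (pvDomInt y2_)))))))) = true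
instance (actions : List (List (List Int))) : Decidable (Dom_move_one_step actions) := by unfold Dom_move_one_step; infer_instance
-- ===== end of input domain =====

-- B replaces A's hash-map duplicate detection (dict of index lists with early return, inside a while-loop)
-- by a sort of the flattened keys and an adjacent-pair scan; same return value, no speed claim.

-- the flattened key c[0]*21 + c[1]; both Pythons compute this exact expression (Pre_ keeps the indices in range)
def pvKey (c : List Int) : Int := PySem.List.pyGetD c 0 0 * 21 + PySem.List.pyGetD c 1 0

-- ===== PORT A =====
-- the 'for i in range(len(target))' body of A's while-loop: walks i, keeps the dict tgt_mp, returns true exactly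
-- where A executes 'return None' (second occurrence of a key).  A's while-loop body runs exactly once: the for-loop
-- returns None at the first conflict, so after it has_conflict is always False, the loop breaks, and the rewrite
-- loop over tgt_mp is dead code.
def aFor (target : List (List Int)) : List Int → PySem.Dict Int (List Int) → Bool
  | [], _ => false
  | i :: rest, mp =>
    let p := pvKey (PySem.List.pyGetD target i [])
    match PySem.Dict.get? mp p with
    | none => aFor target rest (PySem.Dict.insert mp p [i])
    | some _ => true

def move_one_step (actions : List (List (List Int))) : Option (List (List Int)) :=
  match PySem.List.pyGet? actions 0, PySem.List.pyGet? actions 1 with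
  | some _prev, some target =>
    if aFor target (PySem.List.pyRange 0 (target.length : Int) 1) PySem.Dict.empty then none
    else some target
  | _, _ => none  -- IndexError in Python; excluded by Pre_

-- ===== PORT B =====
-- the 'for x, y in zip(ordered, ordered[1:])' adjacent scan of Source B
def bAdjDup : List Int → Bool
  | x :: y :: rest => x == y || bAdjDup (y :: rest)
  | _ => false

def move_one_step_alt (actions : List (List (List Int))) : Option (List (List Int)) :=
  match PySem.List.pyGet? actions 1 with
  | none => none  -- IndexError in Python; excluded by Pre_
  | some cells =>
    let keys := cells.map pvKey
    let ordered := PySem.List.sorted keys (fun x => x) false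
    if bAdjDup ordered then none else some cells

-- ===== PRECONDITION & SPEC =====
-- Pre_ excludes exactly the inputs where Python raises IndexError: fewer than two action rows,
-- or a cell in actions[1] with fewer than two coordinates.
def Pre_move_one_step (actions : List (List (List Int))) : Prop :=
  2 ≤ actions.length ∧ ∀ c ∈ actions.getD 1 [], 2 ≤ c.length
instance (actions : List (List (List Int))) : Decidable (Pre_move_one_step actions) := by unfold Pre_move_one_step; infer_instance

def pvWitness_move_one_step : List (List (List Int)) := [[[0, 0], [1, 1]], [[2, 3], [4, 5]]]

def Spec_move_one_step (actions : List (List (List Int))) (out : Option (List (List Int))) : Prop := out = move_one_step_alt actions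
instance (actions : List (List (List Int))) (out : Option (List (List Int))) : Decidable (Spec_move_one_step actions out) := by unfold Spec_move_one_step; infer_instance

-- ===== CLAIM (what is proved, stated in full; the proofs are below) =====
def Claim_equal_move_one_step : Prop := ∀ (actions : List (List (List Int))), Dom_move_one_step actions → Pre_move_one_step actions → Spec_move_one_step actions (move_one_step actions)

-- ===== LEMMAS AND PROOFS =====

-- the adjacent-equal scan on a (≤)-sorted list detects exactly a duplicate
theorem bAdjDup_iff : ∀ (l : List Int), l.Pairwise (· ≤ ·) → (bAdjDup l = true ↔ ¬ l.Nodup)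
  | [] => by simp [bAdjDup]
  | [x] => by simp [bAdjDup]
  | x :: y :: rest => by
    intro h
    have hp := List.pairwise_cons.mp h
    have htail := hp.2
    have ih := bAdjDup_iff (y :: rest) htail
    by_cases hxe : x = y
    · subst hxe
      simp [bAdjDup, List.nodup_cons]
    · have hx : x ∉ y :: rest := by
        intro hmem
        rcases List.mem_cons.mp hmem with h1 | h2
        · exact hxe h1
        · exact hxe (le_antisymm (hp.1 y List.mem_cons_self) ((List.pairwise_cons.mp htail).1 x h2))
      simp [bAdjDup, hxe, List.nodup_cons, hx, ih]

-- A's index/dict scan from position i returns true iff the key list from position i on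
-- has a repeat or contains a key already present in the dict
theorem aFor_true_iff (t : List (List Int)) :
    ∀ (s : List (List Int)) (i : Nat) (mp : PySem.Dict Int (List Int)),
      t.drop i = s →
      (aFor t (PySem.List.pyRange (i : Int) (t.length : Int) 1) mp = true ↔
        ¬ (s.map pvKey).Nodup ∨ ∃ k ∈ s.map pvKey, (PySem.Dict.get? mp k).isSome) := by
  intro s
  induction s with
  | nil =>
    intro i mp hdrop
    have hlen : t.length ≤ i := by
      have := List.drop_eq_nil_iff.mp hdrop
      omega
    rw [PySem.List.pyRange_one_eq_nil (by exact_mod_cast hlen)]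
    simp [aFor]
  | cons c s' ih =>
    intro i mp hdrop
    have hi : i < t.length := by
      by_contra hnot
      rw [List.drop_eq_nil_iff.mpr (by omega)] at hdrop
      simp at hdrop
    have hget : t.getD i [] = c := by
      have h1 : t[i]? = some c := by
        have h2 : (t.drop i)[0]? = some c := by rw [hdrop]; rfl
        rw [List.getElem?_drop] at h2
        simpa using h2
      simp [List.getD, h1]
    have hdrop' : t.drop (i+1) = s' := by
      have := congrArg List.tail hdrop
      simpa [List.tail_drop] using this
    rw [PySem.List.pyRange_one_cons (by exact_mod_cast hi)]
    simp only [aFor, PySem.List.pyGetD_natCast, hget]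
    cases hm : PySem.Dict.get? mp (pvKey c) with
    | some v => simp [hm]
    | none =>
      have hcast : (i : Int) + 1 = ((i+1 : Nat) : Int) := by push_cast; ring
      rw [hcast]
      rw [ih (i+1) (PySem.Dict.insert mp (pvKey c) [(i:Int)]) hdrop']
      have hins : ∀ k, (PySem.Dict.get? (PySem.Dict.insert mp (pvKey c) [(i:Int)]) k).isSome ↔ (k = pvKey c ∨ (PySem.Dict.get? mp k).isSome) := by
        intro k
        by_cases hk : k = pvKey c
        · subst hk; simp [PySem.Dict.get?_insert_self]
        · simp [PySem.Dict.get?_insert_of_ne _ _ hk, hk]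
      have hm' : ¬ ((PySem.Dict.get? mp (pvKey c)).isSome = true) := by simp [hm]
      simp only [List.map_cons, List.nodup_cons, List.mem_cons, hins]
      constructor
      · rintro (hnd | ⟨k, hkmem, (rfl | hsome)⟩)
        · exact Or.inl (fun hand => hnd hand.2)
        · exact Or.inl (fun hand => hand.1 hkmem)
        · exact Or.inr ⟨k, Or.inr hkmem, hsome⟩
      · rintro (hnd | ⟨k, (rfl | hkmem), hsome⟩)
        · by_cases hmem : pvKey c ∈ List.map pvKey s'
          · exact Or.inr ⟨pvKey c, hmem, Or.inl rfl⟩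
          · exact Or.inl (fun hnodup => hnd ⟨hmem, hnodup⟩)
        · exact absurd hsome hm'
        · exact Or.inr ⟨k, hkmem, Or.inr hsome⟩

-- ===== VERDICT (by name: the statement is the Claim_ definition above) =====
theorem move_one_step_spec : Claim_equal_move_one_step := by
  intro actions _ hpre
  obtain ⟨hlen, _⟩ := hpre
  rcases actions with _ | ⟨a, _ | ⟨t, rest⟩⟩ <;> simp at hlen
  show move_one_step (a :: t :: rest) = move_one_step_alt (a :: t :: rest)
  have hg0 : PySem.List.pyGet? (a :: t :: rest) 0 = some a := by simp
  have hg1 : PySem.List.pyGet? (a :: t :: rest) 1 = some t := by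
    have h0 : (1 : Int) = ((0:Nat) : Int) + 1 := by norm_num
    rw [h0, PySem.List.pyGet?_cons_succ]
    simp
  unfold move_one_step move_one_step_alt
  rw [hg0, hg1]
  have h1 := aFor_true_iff t t 0 PySem.Dict.empty (by simp)
  simp only [Nat.cast_zero, PySem.Dict.get?_empty, Option.isSome_none, Bool.false_eq_true] at h1
  simp only [and_false, exists_false, or_false] at h1
  have hpair : (PySem.List.sorted (t.map pvKey) (fun x => x) false).Pairwise (· ≤ ·) := by
    have := PySem.List.sorted_pairwise (xs := t.map pvKey) (key := fun x => x)
    simpa using this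
  have h2 := bAdjDup_iff _ hpair
  have hperm : (PySem.List.sorted (t.map pvKey) (fun x => x) false).Perm (t.map pvKey) :=
    PySem.List.sorted_perm ..
  have hb : aFor t (PySem.List.pyRange 0 (t.length : Int) 1) PySem.Dict.empty
      = bAdjDup (PySem.List.sorted (t.map pvKey) (fun x => x) false) := by
    have hiff : (aFor t (PySem.List.pyRange 0 (t.length : Int) 1) PySem.Dict.empty = true)
        ↔ (bAdjDup (PySem.List.sorted (t.map pvKey) (fun x => x) false) = true) := by
      rw [h2, hperm.nodup_iff]
      exact h1
    exact Bool.eq_iff_iff.mpr hiff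
  simp [hb]
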